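-- pv_equiv track=rewrite | github.com/Toru1968/mahjong-performance-analysis | 最終手牌生成.py | get_dora_tiles
-- ===== SOURCE A (Python) =====
-- def get_dora_tiles(dorahyo_list: list[int]) -> list[int]:
--     """
--     ドラ表示牌のリストを受け取り、それに対応するドラ牌のリストを返す。
--     (例: [11] (1m) -> [12] (2m))
--     (元のコードはバグがあったため修正しました)
--     """
--     if not dorahyo_list:
--         return []
--
--     dora_list = []
--     for tile in dorahyo_list:
--         dora_tile = None
--         # 数牌 (マンズ:11-19, ピンズ:21-29, ソーズ:31-39)
--         if 11 <= tile <= 39 and (tile % 10 != 0):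
--             # 9の次は1
--             if tile % 10 == 9:
--                 dora_tile = tile - 8
--             else:
--                 dora_tile = tile + 1
--         # 風牌 (東南西北: 41-44)
--         elif 41 <= tile <= 44:
--             # 北の次は東
--             if tile == 44:
--                 dora_tile = 41
--             else:
--                 dora_tile = tile + 1
--         # 三元牌 (白発中: 45-47)
--         elif 45 <= tile <= 47:
--             # 中の次は白
--             if tile == 47:
--                 dora_tile = 45
--             else:
--                 dora_tile = tile + 1
--
--         dora_list.append(dora_tile)
--
--     return dora_list
-- ===== SOURCE B (Python) =====
-- # Each tile cycle: the dora of an indicator is its cyclic successor within its cycle.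
-- CYCLES = [
--     list(range(11, 20)),   # manzu 1-9
--     list(range(21, 30)),   # pinzu 1-9
--     list(range(31, 40)),   # souzu 1-9
--     [41, 42, 43, 44],      # winds
--     [45, 46, 47],          # dragons
-- ]
--
-- def get_dora_tiles(dorahyo_list):
--     out = []
--     for tile in dorahyo_list:
--         dora = None
--         for cyc in CYCLES:
--             if tile in cyc:
--                 dora = cyc[(cyc.index(tile) + 1) % len(cyc)]
--                 break
--         out.append(dora)
--     return out
-- ===== Notes on version B (the rewrite author's own statement) =====
-- stated objective: alternative
-- what changed: Instead of per-range conditional arithmetic with hand-coded wrap-around cases, B models each tile family as an explicit cycle list and computes the dora as the cyclic successor: locate the indicator in its cycle and index at (position+1) mod cycle length; invalid tiles are in no cycle and map to None.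
import Mathlib
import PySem

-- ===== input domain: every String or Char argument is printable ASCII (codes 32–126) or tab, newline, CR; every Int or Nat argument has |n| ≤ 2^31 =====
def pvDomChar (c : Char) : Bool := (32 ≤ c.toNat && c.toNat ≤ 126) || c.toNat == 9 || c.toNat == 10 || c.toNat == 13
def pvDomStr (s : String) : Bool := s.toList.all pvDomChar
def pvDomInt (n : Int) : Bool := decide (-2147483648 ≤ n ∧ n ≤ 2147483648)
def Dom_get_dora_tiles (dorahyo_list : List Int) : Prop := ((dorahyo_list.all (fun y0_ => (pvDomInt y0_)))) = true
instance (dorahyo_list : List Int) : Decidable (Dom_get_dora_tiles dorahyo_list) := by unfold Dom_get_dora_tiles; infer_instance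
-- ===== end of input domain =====

-- B replaces A's per-range conditional arithmetic with explicit tile cycles: the dora is the
-- cyclic successor (position + 1 mod cycle length) of the indicator within its cycle (alternative; same cost).

-- ===== PORT A =====
def get_dora_tiles (dorahyo_list : List Int) : List (Option Int) :=
  if dorahyo_list = [] then []
  else
    dorahyo_list.foldl (fun dora_list tile =>
      let dora_tile : Option Int :=
        if 11 ≤ tile ∧ tile ≤ 39 ∧ PySem.Int.mod tile 10 ≠ 0 then
          if PySem.Int.mod tile 10 = 9 then some (tile - 8) else some (tile + 1)
        else if 41 ≤ tile ∧ tile ≤ 44 then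
          if tile = 44 then some 41 else some (tile + 1)
        else if 45 ≤ tile ∧ tile ≤ 47 then
          if tile = 47 then some 45 else some (tile + 1)
        else none
      dora_list ++ [dora_tile]) []

-- ===== PORT B =====
def CYCLES : List (List Int) :=
  [PySem.List.pyRange 11 20 1, PySem.List.pyRange 21 30 1, PySem.List.pyRange 31 40 1,
   [41, 42, 43, 44], [45, 46, 47]]

-- inner 'for cyc in CYCLES: … break' loop; cyc.index / cyc[(i+1) % len(cyc)] via PySem
-- (the 'none' arm of the match is Python's unreachable ValueError, guarded by 'tile ∈ cyc')
def findDora (tile : Int) : List (List Int) → Option Int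
  | [] => none
  | cyc :: rest =>
    if tile ∈ cyc then
      match PySem.List.index? cyc tile with
      | some i => PySem.List.pyGet? cyc (PySem.Int.mod ((i : Int) + 1) (cyc.length : Int))
      | none => none
    else findDora tile rest

def get_dora_tiles_alt (dorahyo_list : List Int) : List (Option Int) :=
  dorahyo_list.foldl (fun out tile => out ++ [findDora tile CYCLES]) []

-- ===== PRECONDITION & SPEC =====
def Spec_get_dora_tiles (dorahyo_list : List Int) (out : List (Option Int)) : Prop := out = get_dora_tiles_alt dorahyo_list
instance (dorahyo_list : List Int) (out : List (Option Int)) : Decidable (Spec_get_dora_tiles dorahyo_list out) := by unfold Spec_get_dora_tiles; infer_instance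

-- ===== CLAIM =====
def Claim_equal_get_dora_tiles : Prop := ∀ (dorahyo_list : List Int), Dom_get_dora_tiles dorahyo_list → Spec_get_dora_tiles dorahyo_list (get_dora_tiles dorahyo_list)

-- ===== LEMMAS AND PROOFS =====

-- A's per-element value
def elemA (tile : Int) : Option Int :=
  if 11 ≤ tile ∧ tile ≤ 39 ∧ PySem.Int.mod tile 10 ≠ 0 then
    if PySem.Int.mod tile 10 = 9 then some (tile - 8) else some (tile + 1)
  else if 41 ≤ tile ∧ tile ≤ 44 then
    if tile = 44 then some 41 else some (tile + 1)
  else if 45 ≤ tile ∧ tile ≤ 47 then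
    if tile = 47 then some 45 else some (tile + 1)
  else none

theorem elem_eq (t : Int) : elemA t = findDora t CYCLES := by
  by_cases h : 11 ≤ t ∧ t ≤ 47
  · obtain ⟨h1, h2⟩ := h
    interval_cases t <;> decide
  · have hA : elemA t = none := by
      unfold elemA
      rw [if_neg (by rintro ⟨a, b, -⟩; omega), if_neg (by omega), if_neg (by omega)]
    have e : CYCLES =
        [[11, 12, 13, 14, 15, 16, 17, 18, 19],
         [21, 22, 23, 24, 25, 26, 27, 28, 29],
         [31, 32, 33, 34, 35, 36, 37, 38, 39],
         [41, 42, 43, 44], [45, 46, 47]] := by decide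
    have hB : findDora t CYCLES = none := by
      rw [e]
      rw [findDora, if_neg (by simp; omega)]
      rw [findDora, if_neg (by simp; omega)]
      rw [findDora, if_neg (by simp; omega)]
      rw [findDora, if_neg (by simp; omega)]
      rw [findDora, if_neg (by simp; omega)]
      rfl
    rw [hA, hB]

theorem foldl_append_singleton (f : Int → Option Int) (l : List Int) (acc : List (Option Int)) :
    l.foldl (fun d t => d ++ [f t]) acc = acc ++ l.map f := by
  induction l generalizing acc with
  | nil => simp
  | cons x xs ih => simp [List.foldl, ih]

-- ===== VERDICT =====
theorem get_dora_tiles_spec : Claim_equal_get_dora_tiles := by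
  intro l _
  unfold Spec_get_dora_tiles get_dora_tiles get_dora_tiles_alt
  by_cases h : l = []
  · simp [h]
  · rw [if_neg h]
    show l.foldl (fun d t => d ++ [elemA t]) [] = _
    rw [foldl_append_singleton elemA l [],
        foldl_append_singleton (fun t => findDora t CYCLES) l []]
    simp only [List.nil_append]
    exact List.map_congr_left (fun t _ => elem_eq t)
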